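-- pv_equiv track=rewrite | github.com/miliar/Code_Jam_Webscraper | solutions_python/Problem_75/891.py | makeOppose
-- ===== SOURCE A (Python) =====
-- def makeOppose(input):
--     ret = {}
--     for group in input:
--         for i in range(2):
--             if group[i] not in ret:
--                 ret[group[i]] = []
--             if group[(i + 1)%2] not in ret[group[i]]:
--                 ret[group[i]].append(group[(i + 1)%2])
--     return ret
-- ===== SOURCE B (Python) =====
-- def makeOppose(input):
--     pairs = [(g[i], g[1 - i]) for g in input for i in range(2)]
--     keys = list(dict.fromkeys(q for q, _ in pairs))
--     return {k: list(dict.fromkeys(p for q, p in pairs if q == k)) for k in keys}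
-- ===== Notes on version B (the rewrite author's own statement) =====
-- stated objective: alternative
-- what changed: A incrementally mutates a dict of dedup lists with membership-test branches inside a nested loop; B flattens the input to a directed-edge list once, dedups the sources for the key order, and builds each value by a per-key filter plus ordered dedup (dict.fromkeys).
-- outside the precondition, e.g. on makeOppose([[5]]): A raises IndexError, B raises IndexError; on makeOppose([[]]): A raises IndexError, B raises IndexError
import Mathlib
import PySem

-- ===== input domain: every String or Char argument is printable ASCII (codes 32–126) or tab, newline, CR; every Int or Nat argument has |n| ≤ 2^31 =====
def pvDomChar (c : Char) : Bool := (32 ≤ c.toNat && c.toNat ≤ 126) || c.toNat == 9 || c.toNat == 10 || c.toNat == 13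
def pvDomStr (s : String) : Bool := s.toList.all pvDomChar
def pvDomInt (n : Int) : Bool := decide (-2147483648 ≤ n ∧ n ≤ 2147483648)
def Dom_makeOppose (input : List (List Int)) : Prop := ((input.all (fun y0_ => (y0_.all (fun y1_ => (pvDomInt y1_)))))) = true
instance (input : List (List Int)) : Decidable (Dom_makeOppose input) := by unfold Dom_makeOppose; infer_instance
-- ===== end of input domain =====

-- B replaces A's incremental dict-of-dedup-lists with a flattened directed-edge list,
-- an ordered key dedup and a per-key filter+dedup pass (objective: alternative algorithm, not faster).

-- ===== PORT A =====
def makeOppose (input : List (List Int)) : List (Int × List Int) :=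
  (input.foldl (fun ret group =>
    (PySem.List.pyRange 0 2 1).foldl (fun ret i =>
      -- if group[i] not in ret: ret[group[i]] = []
      let ret := if ret.contains (PySem.List.pyGetD group i 0) then ret
                 else ret.insert (PySem.List.pyGetD group i 0) []
      -- if group[(i+1)%2] not in ret[group[i]]: ret[group[i]].append(group[(i+1)%2])
      if (ret.getD (PySem.List.pyGetD group i 0) []).contains
           (PySem.List.pyGetD group (PySem.Int.mod (i + 1) 2) 0) then ret
      else ret.insert (PySem.List.pyGetD group i 0)
             (ret.getD (PySem.List.pyGetD group i 0) [] ++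
              [PySem.List.pyGetD group (PySem.Int.mod (i + 1) 2) 0])
    ) ret) (PySem.Dict.empty : PySem.Dict Int (List Int))).items

-- ===== PORT B =====
def makeOppose_alt (input : List (List Int)) : List (Int × List Int) :=
  let pairs := input.flatMap (fun g =>
    (PySem.List.pyRange 0 2 1).map (fun i =>
      (PySem.List.pyGetD g i 0, PySem.List.pyGetD g (1 - i) 0)))
  let keys := PySem.List.dedup (pairs.map (·.1))
  keys.map (fun k =>
    (k, PySem.List.dedup ((pairs.filter (fun p => p.1 == k)).map (·.2))))

-- ===== PRECONDITION & SPEC =====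
-- Pre_ excludes exactly the inputs on which Python A raises IndexError: a group with fewer than 2 elements.
def Pre_makeOppose (input : List (List Int)) : Prop := ∀ g ∈ input, 2 ≤ g.length
instance (input : List (List Int)) : Decidable (Pre_makeOppose input) := by unfold Pre_makeOppose; infer_instance
def pvWitness_makeOppose : List (List Int) := [[1, 2], [2, 1], [1, 1], [3, 1]]
def Spec_makeOppose (input : List (List Int)) (out : List (Int × List Int)) : Prop := out = makeOppose_alt input
instance (input : List (List Int)) (out : List (Int × List Int)) : Decidable (Spec_makeOppose input out) := by unfold Spec_makeOppose; infer_instance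

-- ===== CLAIM (what is proved, stated in full; the proofs are below) =====
def Claim_equal_makeOppose : Prop := ∀ (input : List (List Int)), Dom_makeOppose input → Pre_makeOppose input → Spec_makeOppose input (makeOppose input)

-- ===== LEMMAS AND PROOFS =====

-- one (source, partner) update of A's dict, abstracted from A's inner loop body
def pvStep (d : PySem.Dict Int (List Int)) (p : Int × Int) : PySem.Dict Int (List Int) :=
  let d1 := if d.contains p.1 then d else d.insert p.1 []
  if (d1.getD p.1 []).contains p.2 then d1 else d1.insert p.1 (d1.getD p.1 [] ++ [p.2])

-- the two directed edges A processes for one group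
def pvPairsOf (g : List Int) : List (Int × Int) :=
  [(PySem.List.pyGetD g 0 0, PySem.List.pyGetD g 1 0),
   (PySem.List.pyGetD g 1 0, PySem.List.pyGetD g 0 0)]

theorem pvPairsOf_eq (g : List Int) :
    (PySem.List.pyRange 0 2 1).map (fun i =>
      (PySem.List.pyGetD g i 0, PySem.List.pyGetD g (1 - i) 0)) = pvPairsOf g := by
  have h : PySem.List.pyRange 0 2 1 = [0, 1] := by decide
  simp [h, pvPairsOf]

theorem pvA_eq_foldl_pairs (input : List (List Int)) :
    makeOppose input = ((input.flatMap pvPairsOf).foldl pvStep PySem.Dict.empty).items := by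
  unfold makeOppose
  rw [List.foldl_flatMap]
  congr 1

theorem pvStep_keys (d : PySem.Dict Int (List Int)) (p : Int × Int) :
    (pvStep d p).keys = PySem.Set.add d.keys p.1 := by
  unfold pvStep
  by_cases hc : d.contains p.1 = true
  · have hm : p.1 ∈ d.keys := (PySem.Dict.contains_iff_mem_keys d p.1).mp hc
    simp only [hc, if_true]
    rw [PySem.Set.add_of_mem hm]
    split
    · rfl
    · exact PySem.Dict.keys_insert_of_contains d _ hc
  · have hm : p.1 ∉ d.keys := fun h => hc ((PySem.Dict.contains_iff_mem_keys d p.1).mpr h)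
    simp only [hc, if_false, Bool.false_eq_true]
    rw [PySem.Set.add_of_not_mem hm]
    rw [PySem.Dict.getD_insert_self d p.1 [] []]
    simp only [List.contains_nil, Bool.false_eq_true, if_false]
    rw [PySem.Dict.keys_insert_of_contains _ _ (PySem.Dict.contains_insert_self d p.1 [])]
    exact PySem.Dict.keys_insert_of_not_contains d [] (by simpa using hc)

theorem pvStep_getD (d : PySem.Dict Int (List Int)) (p : Int × Int) (k : Int) :
    (pvStep d p).getD k [] =
      if p.1 = k then PySem.Set.add (d.getD k []) p.2 else d.getD k [] := by
  unfold pvStep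
  have hd1 : ∀ j : Int, (if d.contains p.1 then d else d.insert p.1 []).getD j [] = d.getD j [] := by
    intro j
    by_cases hc : d.contains p.1 = true
    · rw [if_pos hc]
    · rw [if_neg (by simp [hc]), PySem.Dict.getD_insert]
      by_cases hj : j = p.1
      · subst hj
        rw [if_pos rfl, PySem.Dict.getD_of_not_contains d [] (by simpa using hc)]
      · rw [if_neg hj]
  simp only [hd1]
  by_cases hy : (d.getD p.1 []).contains p.2 = true
  · simp only [hy, if_true, hd1]
    by_cases hk : p.1 = k
    · subst hk
      rw [if_pos rfl, PySem.Set.add_of_mem (by simpa using hy)]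
    · rw [if_neg hk]
  · simp only [hy, Bool.false_eq_true, if_false]
    rw [PySem.Dict.getD_insert]
    by_cases hk : p.1 = k
    · subst hk
      rw [if_pos rfl, if_pos rfl, PySem.Set.add_of_not_mem (by simpa using hy)]
    · rw [if_neg (fun h => hk h.symm), if_neg hk]
      exact hd1 k

theorem pvFoldl_keys (ps : List (Int × Int)) (d : PySem.Dict Int (List Int)) :
    (ps.foldl pvStep d).keys = PySem.Set.update d.keys (ps.map (·.1)) := by
  induction ps generalizing d with
  | nil => rfl
  | cons p ps ih =>
    simp only [List.foldl_cons, List.map_cons, PySem.Set.update] at *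
    rw [ih, pvStep_keys]

theorem pvFoldl_getD (ps : List (Int × Int)) (d : PySem.Dict Int (List Int)) (k : Int) :
    (ps.foldl pvStep d).getD k [] =
      ((ps.filter (fun p => p.1 == k)).map (·.2)).foldl PySem.Set.add (d.getD k []) := by
  induction ps generalizing d with
  | nil => rfl
  | cons p ps ih =>
    simp only [List.foldl_cons, List.filter_cons]
    rw [ih, pvStep_getD]
    by_cases hk : p.1 = k
    · simp [hk]
    · simp [hk]

theorem makeOppose_spec' (input : List (List Int)) : makeOppose input = makeOppose_alt input := by
  rw [pvA_eq_foldl_pairs]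
  set P : List (Int × Int) := input.flatMap pvPairsOf with hP
  have hkeys : ((P.foldl pvStep PySem.Dict.empty)).keys = PySem.Set.ofList (P.map (·.1)) := by
    rw [pvFoldl_keys, PySem.Set.ofList_eq_foldl]
    simp [PySem.Dict.keys_empty, PySem.Set.update]
  have hnd : ((P.foldl pvStep PySem.Dict.empty)).keys.Nodup := by
    rw [hkeys]; exact PySem.Set.nodup_ofList _
  rw [PySem.Dict.items_eq_map_keys _ hnd [], hkeys]
  have hval : ∀ k : Int, (P.foldl pvStep PySem.Dict.empty).getD k [] =
      PySem.Set.ofList ((P.filter (fun p => p.1 == k)).map (·.2)) := by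
    intro k
    rw [pvFoldl_getD, PySem.Dict.getD_empty, PySem.Set.ofList_eq_foldl]
  have hlhs := List.map_congr_left
    (l := PySem.Set.ofList (P.map (·.1)))
    (f := fun k => (k, (P.foldl pvStep PySem.Dict.empty).getD k []))
    (g := fun k => (k, PySem.Set.ofList ((P.filter (fun p => p.1 == k)).map (·.2))))
    (fun k _ => by simp only [hval])
  rw [hlhs]
  simp only [makeOppose_alt, PySem.List.dedup_eq_ofList, pvPairsOf_eq, ← hP]

-- ===== VERDICT (by name: the statement is the Claim_ definition above) =====
theorem makeOppose_spec : Claim_equal_makeOppose := by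
  intro input _ _
  exact makeOppose_spec' input
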